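-- pv_equiv track=rewrite | github.com/marekblvn/advent-of-code-2025 | day-03/main.py | get_largest_joltage
-- ===== SOURCE A (Python) =====
-- def get_largest_joltage(battery_line: str) -> int:
--     a,b = battery_line[0], battery_line[1]
--     for i in range(1, len(battery_line)):
--         if (battery_line[i] > b):
--             b = battery_line[i]
--         if (battery_line[i] > a and i < len(battery_line) - 1):
--             a = battery_line[i]
--             b = battery_line[i+1]
--     return int(a+b)
-- ===== SOURCE B (Python) =====
-- def get_largest_joltage(battery_line: str) -> int:
--     first = max(battery_line[:-1])
--     j = battery_line.index(first)
--     second = max(battery_line[j + 1:])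
--     return int(first + second)
-- ===== Notes on version B (the rewrite author's own statement) =====
-- stated objective: simpler
-- what changed: A's single interleaved loop carrying the pair (a, b) and patching b on every update of a is replaced by two independent maximum scans over slices (max of battery_line[:-1], then max of the suffix after its first index) plus one index lookup.
import Mathlib
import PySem

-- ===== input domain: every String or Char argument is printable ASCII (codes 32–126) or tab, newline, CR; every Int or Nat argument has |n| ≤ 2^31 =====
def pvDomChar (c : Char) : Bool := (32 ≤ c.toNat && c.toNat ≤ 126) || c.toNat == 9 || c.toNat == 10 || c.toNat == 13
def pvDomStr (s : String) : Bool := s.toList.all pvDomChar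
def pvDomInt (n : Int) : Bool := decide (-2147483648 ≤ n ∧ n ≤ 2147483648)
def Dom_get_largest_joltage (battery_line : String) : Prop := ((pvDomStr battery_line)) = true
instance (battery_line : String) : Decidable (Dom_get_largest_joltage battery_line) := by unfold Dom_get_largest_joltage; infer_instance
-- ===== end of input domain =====

-- B replaces A's single interleaved loop (carrying the pair (a, b) and patching b on every
-- update of a) by two independent maximum scans over slices plus one first-index lookup.
-- Objective: simpler. Both raise on strings of length < 2 and on non-parsable digit pairs
-- (excluded by Pre_).

-- ===== PORT A =====
-- loop body of A: `for i in range(1, len(battery_line)): ...` over state (a, b)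
def gljStep (l : List Char) (n : Int) (ab : Char × Char) (i : Int) : Char × Char :=
  let c := PySem.List.pyGetD l i '?'                      -- battery_line[i] (in range for 1 ≤ i < n)
  let b1 := if ab.2 < c then c else ab.2                  -- if battery_line[i] > b: b = battery_line[i]
  if ab.1 < c ∧ i < n - 1 then                            -- if battery_line[i] > a and i < len-1:
    (c, PySem.List.pyGetD l (i + 1) '?')                  --   a, b = battery_line[i], battery_line[i+1]
  else (ab.1, b1)

def get_largest_joltage (battery_line : String) : Int :=
  let l := battery_line.toList
  let n : Int := PySem.Str.len battery_line
  -- a, b = battery_line[0], battery_line[1]  (IndexError for len < 2: excluded by Pre_)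
  let ab := (PySem.List.pyRange 1 n).foldl (gljStep l n)
      (PySem.List.pyGetD l 0 '?', PySem.List.pyGetD l 1 '?')
  -- int(a + b)  (ValueError when not parsable: excluded by Pre_)
  (PySem.Int.ofChars? [ab.1, ab.2]).getD 0

-- ===== PORT B =====
def get_largest_joltage_alt (battery_line : String) : Int :=
  let l := battery_line.toList
  -- first = max(battery_line[:-1])   (max over a string's chars = max? with identity key)
  match PySem.List.max? (PySem.List.slice l none (some (-1))) (fun c => c) with
  | none => 0                                             -- ValueError of max('') (outside Pre_)
  | some first =>
    -- j = battery_line.index(first)  (single present char: = first index in the char list)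
    match PySem.List.index? l first with
    | none => 0                                           -- unreachable: first ∈ l
    | some j =>
      -- second = max(battery_line[j + 1:])
      match PySem.List.max? (PySem.List.slice l (some ((j : Int) + 1)) none) (fun c => c) with
      | none => 0                                         -- unreachable for len ≥ 2
      | some second =>
        -- int(first + second)  (ValueError excluded by Pre_)
        (PySem.Int.ofChars? [first, second]).getD 0

-- ===== PRECONDITION & SPEC =====
-- Does int() parse the two characters A ends up concatenating (the max of the prefix and the
-- max of what follows its first occurrence)? Stated declaratively via library maxima / idxOf;
-- no loop state is replayed.
def pvParses (l : List Char) : Bool :=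
  match l.dropLast.max? with
  | none => true
  | some a =>
    match (l.drop (List.idxOf a l + 1)).max? with
    | none => true
    | some b => (PySem.Int.ofChars? [a, b]).isSome

-- Pre_ holds exactly where the Python A returns: length ≥ 2 (else IndexError on
-- battery_line[0]/[1]) and int() parses the selected two characters (else ValueError).
def Pre_get_largest_joltage (battery_line : String) : Prop :=
  2 ≤ battery_line.toList.length ∧ pvParses battery_line.toList = true
instance (battery_line : String) : Decidable (Pre_get_largest_joltage battery_line) := by
  unfold Pre_get_largest_joltage; infer_instance

def pvWitness_get_largest_joltage : String := "3981547"

def Spec_get_largest_joltage (battery_line : String) (out : Int) : Prop := out = get_largest_joltage_alt battery_line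
instance (battery_line : String) (out : Int) : Decidable (Spec_get_largest_joltage battery_line out) := by unfold Spec_get_largest_joltage; infer_instance

-- ===== CLAIM (what is proved, stated in full; the proofs are below) =====
def Claim_equal_get_largest_joltage : Prop := ∀ (battery_line : String), Dom_get_largest_joltage battery_line → Pre_get_largest_joltage battery_line → Spec_get_largest_joltage battery_line (get_largest_joltage battery_line)

-- ===== LEMMAS AND PROOFS =====

-- max of the characters l[lo], …, l[hi] (callers keep lo ≤ hi < l.length)
def segMax (l : List Char) (lo hi : Nat) : Char :=
  ((l.drop lo).take (hi + 1 - lo)).foldl max (l.getD lo '?')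

-- the state (a, b) A's loop holds after iterations 1, …, k
def abSpec (l : List Char) (k : Nat) : Char × Char :=
  let a := segMax l 0 (min k (l.length - 2))
  let j := List.idxOf a l
  (a, segMax l (j + 1) (max k (j + 1)))

lemma foldl_max_mem (t : List Char) (i : Char) : t.foldl max i ∈ i :: t := by
  induction t generalizing i with
  | nil => simp
  | cons x xs ih =>
    simp only [List.foldl_cons]
    rcases max_choice i x with hm | hm <;> rw [hm]
    · rcases List.mem_cons.mp (ih i) with h | h <;> simp [h]
    · rcases List.mem_cons.mp (ih x) with h | h <;> simp [h]

lemma segMax_self (l : List Char) (lo : Nat) : segMax l lo lo = l.getD lo '?' := by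
  unfold segMax
  have h1 : lo + 1 - lo = 1 := by omega
  rw [h1]
  rcases h : l.drop lo with _ | ⟨d, dt⟩
  · simp
  · have hg0 : (List.drop lo l)[0]? = l[lo + 0]? := List.getElem?_drop
    rw [h] at hg0
    simp only [List.getElem?_cons_zero, Nat.add_zero] at hg0
    have hd : l.getD lo '?' = d := by rw [List.getD_eq_getElem?_getD, ← hg0]; rfl
    rw [hd]
    simp

lemma segMax_succ (l : List Char) (lo hi : Nat) (hlohi : lo ≤ hi) (hhi : hi + 1 < l.length) :
    segMax l lo (hi + 1) = max (segMax l lo hi) (l.getD (hi + 1) '?') := by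
  unfold segMax
  have h1 : hi + 1 + 1 - lo = (hi + 1 - lo) + 1 := by omega
  have h2 : lo + (hi + 1 - lo) = hi + 1 := by omega
  have hsome : l[hi + 1]? = some l[hi + 1] := List.getElem?_eq_getElem hhi
  have hg : (l.drop lo)[hi + 1 - lo]? = some (l.getD (hi + 1) '?') := by
    have hg0 : (List.drop lo l)[hi + 1 - lo]? = l[lo + (hi + 1 - lo)]? := List.getElem?_drop
    rw [hg0, h2, List.getD_eq_getElem?_getD, hsome]
    rfl
  rw [h1, List.take_add_one, hg]
  simp [List.foldl_append]

lemma segMax_all_le (l : List Char) (lo hi : Nat) :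
    ∀ x ∈ (l.drop lo).take (hi + 1 - lo), x ≤ segMax l lo hi :=
  (PySem.List.le_foldl_max ((l.drop lo).take (hi + 1 - lo)) (l.getD lo '?')).2

lemma segMax_mem (l : List Char) (lo hi : Nat) (h1 : lo ≤ hi) (h2 : hi < l.length) :
    segMax l lo hi ∈ (l.drop lo).take (hi + 1 - lo) := by
  rcases h : l.drop lo with _ | ⟨d, dt⟩
  · exact absurd (List.drop_eq_nil_iff.mp h) (by omega)
  · have hg0 : (List.drop lo l)[0]? = l[lo + 0]? := List.getElem?_drop
    rw [h] at hg0
    simp only [List.getElem?_cons_zero, Nat.add_zero] at hg0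
    have hd : l.getD lo '?' = d := by rw [List.getD_eq_getElem?_getD, ← hg0]; rfl
    have h3 : hi + 1 - lo = (hi - lo) + 1 := by omega
    rw [segMax, h, hd, h3, List.take_succ_cons, List.foldl_cons, max_self]
    exact foldl_max_mem (dt.take (hi - lo)) d

lemma idxOf_lt_of_mem_take (l : List Char) (v : Char) (m : Nat) (h : v ∈ l.take m) :
    List.idxOf v l < m := by
  have hsplit := List.idxOf_append (l₁ := l.take m) (l₂ := l.drop m) (a := v)
  rw [List.take_append_drop] at hsplit
  rw [hsplit, if_pos h]
  calc List.idxOf v (l.take m) < (l.take m).length := List.idxOf_lt_length_of_mem h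
    _ ≤ m := by simp

lemma idxOf_eq_of_gt (l : List Char) (c : Char) (m : Nat) (hm : m < l.length)
    (hall : ∀ x ∈ l.take m, x < c) (hc : l.getD m '?' = c) : List.idxOf c l = m := by
  have hnot : c ∉ l.take m := fun hc' => absurd (hall c hc') (lt_irrefl c)
  have hsplit := List.idxOf_append (l₁ := l.take m) (l₂ := l.drop m) (a := c)
  rw [List.take_append_drop] at hsplit
  rw [hsplit, if_neg hnot, List.drop_eq_getElem_cons hm]
  have hgc : l[m] = c := by
    rw [List.getD_eq_getElem?_getD, List.getElem?_eq_getElem hm] at hc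
    exact hc
  rw [hgc, List.idxOf_cons_self, List.length_take, Nat.zero_add]
  omega

lemma max?_eq_segMax (l : List Char) (lo hi : Nat) (h1 : lo ≤ hi) (h2 : hi < l.length) :
    PySem.List.max? ((l.drop lo).take (hi + 1 - lo)) (fun c => c) = some (segMax l lo hi) := by
  rcases h : l.drop lo with _ | ⟨d, dt⟩
  · exact absurd (List.drop_eq_nil_iff.mp h) (by omega)
  · have hg0 : (List.drop lo l)[0]? = l[lo + 0]? := List.getElem?_drop
    rw [h] at hg0
    simp only [List.getElem?_cons_zero, Nat.add_zero] at hg0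
    have hd : l.getD lo '?' = d := by rw [List.getD_eq_getElem?_getD, ← hg0]; rfl
    have h3 : hi + 1 - lo = (hi - lo) + 1 := by omega
    rw [segMax, h, hd, h3, List.take_succ_cons, PySem.List.max?_id_cons, List.foldl_cons, max_self]

-- one iteration of A's loop, i = 1 (the base state of the invariant)
lemma glj_base (l : List Char) (h2 : 2 ≤ l.length) :
    gljStep l (l.length : Int) (l.getD 0 '?', l.getD 1 '?') 1 = abSpec l 1 := by
  rcases l with _ | ⟨x, l1⟩
  · simp at h2
  rcases l1 with _ | ⟨y, t⟩
  · simp at h2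
  have hd0 : (x :: y :: t).getD 0 '?' = x := rfl
  have hd1 : (x :: y :: t).getD 1 '?' = y := rfl
  have e1 : PySem.List.pyGetD (x :: y :: t) (1 : Int) '?' = y := by
    rw [show (1 : Int) = ((1 : Nat) : Int) by norm_num, PySem.List.pyGetD_natCast, hd1]
  rcases t with _ | ⟨z, t'⟩
  · -- len = 2 : the second if is dead (i < len - 1 is false), b stays battery_line[1]
    have hcond : ¬(x < y ∧ (1 : Int) < (([x, y].length : Nat) : Int) - 1) := by simp
    simp only [gljStep, e1, hd0, hd1]
    rw [if_neg hcond, if_neg (lt_irrefl y)]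
    have hm : min 1 ([x, y].length - 2) = 0 := by simp
    simp only [abSpec, hm, segMax_self, List.getD_cons_zero, List.idxOf_cons_self]
    norm_num [segMax_self, hd1]
  · -- len ≥ 3
    have hd2 : (x :: y :: z :: t').getD 2 '?' = z := rfl
    have e2 : PySem.List.pyGetD (x :: y :: z :: t') ((1 : Int) + 1) '?' = z := by
      rw [show (1 : Int) + 1 = ((2 : Nat) : Int) by norm_num, PySem.List.pyGetD_natCast, hd2]
    have hm : min 1 ((x :: y :: z :: t').length - 2) = 1 := by simp
    have hseg01 : segMax (x :: y :: z :: t') 0 1 = max x y := by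
      rw [show (1 : Nat) = 0 + 1 by rfl,
        segMax_succ (x :: y :: z :: t') 0 0 (le_refl 0) (by simp), segMax_self]
      rfl
    simp only [gljStep, e1, e2, hd0, hd1]
    by_cases hxy : x < y
    · have hcond : x < y ∧ (1 : Int) < (((x :: y :: z :: t').length : Nat) : Int) - 1 := by
        refine ⟨hxy, ?_⟩
        simp only [List.length_cons]
        push_cast
        omega
      rw [if_pos hcond]
      have hidx : List.idxOf y (x :: y :: z :: t') = 1 := by
        rw [List.idxOf_cons_ne _ (by exact fun h => absurd h (ne_of_lt hxy)),
          List.idxOf_cons_self]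
      simp only [abSpec, hm, hseg01, max_eq_right hxy.le, hidx]
      norm_num [segMax_self, hd2]
    · have hcond : ¬(x < y ∧ (1 : Int) < (((x :: y :: z :: t').length : Nat) : Int) - 1) :=
        fun h => hxy h.1
      rw [if_neg hcond, if_neg (lt_irrefl y)]
      simp only [abSpec, hm, hseg01, max_eq_left (not_lt.mp hxy), List.idxOf_cons_self]
      norm_num [segMax_self, hd1]

-- one iteration of A's loop at index k + 1, from the invariant state after k
lemma glj_step (l : List Char) (h2 : 2 ≤ l.length) (k : Nat) (_h1 : 1 ≤ k)
    (hk : k + 1 ≤ l.length - 1) :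
    gljStep l (l.length : Int) (abSpec l k) ((k : Int) + 1) = abSpec l (k + 1) := by
  have hc : PySem.List.pyGetD l ((k : Int) + 1) '?' = l.getD (k + 1) '?' := by
    rw [show ((k : Int) + 1) = ((k + 1 : Nat) : Int) by push_cast; ring,
      PySem.List.pyGetD_natCast]
  have hc2 : PySem.List.pyGetD l ((k : Int) + 1 + 1) '?' = l.getD (k + 2) '?' := by
    rw [show ((k : Int) + 1 + 1) = ((k + 2 : Nat) : Int) by push_cast; ring,
      PySem.List.pyGetD_natCast]
  have habs : abSpec l k =
      (segMax l 0 (min k (l.length - 2)),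
       segMax l (List.idxOf (segMax l 0 (min k (l.length - 2))) l + 1)
         (max k (List.idxOf (segMax l 0 (min k (l.length - 2))) l + 1))) := rfl
  have hamem : segMax l 0 (min k (l.length - 2)) ∈ l.take (min k (l.length - 2) + 1) := by
    have h := segMax_mem l 0 (min k (l.length - 2)) (Nat.zero_le _) (by omega)
    simpa using h
  have hj : List.idxOf (segMax l 0 (min k (l.length - 2))) l < min k (l.length - 2) + 1 :=
    idxOf_lt_of_mem_take l _ _ hamem
  have hall : ∀ x ∈ l.take (k + 1), x ≤ segMax l 0 k := by
    have h := segMax_all_le l 0 k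
    simpa using h
  rw [habs]
  simp only [gljStep, hc, hc2]
  by_cases hcond :
      segMax l 0 (min k (l.length - 2)) < l.getD (k + 1) '?' ∧ ((k : Int) + 1) < (l.length : Int) - 1
  · -- a < battery_line[k+1] and k+1 < len-1 : a and b both move to the right
    obtain ⟨hac, hklt⟩ := hcond
    have hk2 : k + 1 ≤ l.length - 2 := by omega
    have hmk : min k (l.length - 2) = k := by omega
    have hm' : min (k + 1) (l.length - 2) = k + 1 := by omega
    rw [hmk] at hac
    have ha' : segMax l 0 (k + 1) = l.getD (k + 1) '?' := by
      rw [segMax_succ l 0 k (Nat.zero_le _) (by omega)]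
      exact max_eq_right hac.le
    have hidx : List.idxOf (l.getD (k + 1) '?') l = k + 1 :=
      idxOf_eq_of_gt l _ (k + 1) (by omega)
        (fun x hx => lt_of_le_of_lt (hall x hx) hac) rfl
    have hbmax : max (k + 1) (k + 1 + 1) = k + 2 := by omega
    rw [if_pos ⟨by rw [hmk]; exact hac, hklt⟩]
    simp only [abSpec, hm', ha', hidx, hbmax, segMax_self]
  · -- a stays (and so does its first index); b just absorbs battery_line[k+1]
    rw [if_neg hcond]
    have hstay : segMax l 0 (min (k + 1) (l.length - 2)) = segMax l 0 (min k (l.length - 2)) := by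
      by_cases hk2 : k + 1 ≤ l.length - 2
      · have hmk : min k (l.length - 2) = k := by omega
        have hm' : min (k + 1) (l.length - 2) = k + 1 := by omega
        have hca : l.getD (k + 1) '?' ≤ segMax l 0 k := by
          rcases not_and_or.mp hcond with h | h
          · rw [hmk] at h
            exact not_lt.mp h
          · exact absurd (by omega : ((k : Int) + 1) < (l.length : Int) - 1) h
        rw [hm', hmk, segMax_succ l 0 k (Nat.zero_le _) (by omega)]
        exact max_eq_left hca
      · have : min (k + 1) (l.length - 2) = min k (l.length - 2) := by omega
        rw [this]
    have hjk : List.idxOf (segMax l 0 (min k (l.length - 2))) l ≤ k := by omega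
    simp only [abSpec, hstay]
    by_cases hjeq : List.idxOf (segMax l 0 (min k (l.length - 2))) l = k
    · -- a's first index is exactly k : the old b is battery_line[k+1] itself
      rw [hjeq]
      have hbk : max k (k + 1) = k + 1 := by omega
      have hbk' : max (k + 1) (k + 1) = k + 1 := by omega
      rw [hbk, hbk', segMax_self]
      split
      · rfl
      · rfl
    · -- a's first index is j < k : b(k+1) = max (b(k)) battery_line[k+1]
      have hjlt : List.idxOf (segMax l 0 (min k (l.length - 2))) l < k := by omega
      have hbk : max k (List.idxOf (segMax l 0 (min k (l.length - 2))) l + 1) = k := by omega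
      have hbk' : max (k + 1) (List.idxOf (segMax l 0 (min k (l.length - 2))) l + 1) = k + 1 := by
        omega
      rw [hbk, hbk',
        segMax_succ l (List.idxOf (segMax l 0 (min k (l.length - 2))) l + 1) k (by omega)
          (by omega)]
      split
      next hlt => rw [max_eq_right (le_of_lt hlt)]
      next hlt => rw [max_eq_left (not_lt.mp hlt)]

lemma glj_loop (l : List Char) (h2 : 2 ≤ l.length) (k : Nat) (_h1 : 1 ≤ k) (hk : k ≤ l.length - 1) :
    (PySem.List.pyRange 1 ((k : Int) + 1)).foldl (gljStep l (l.length : Int))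
      (l.getD 0 '?', l.getD 1 '?') = abSpec l k := by
  induction k with
  | zero => omega
  | succ k ih =>
    by_cases hk0 : k = 0
    · subst hk0
      have hb : (((0 + 1 : Nat)) : Int) + 1 = 2 := by norm_num
      rw [hb, show PySem.List.pyRange (1 : Int) 2 = [1] from by decide]
      simp only [List.foldl_cons, List.foldl_nil]
      exact glj_base l h2
    · have hk1 : 1 ≤ k := by omega
      have ihk := ih hk1 (by omega)
      have hcast : (((k + 1 : Nat)) : Int) + 1 = ((k : Int) + 1) + 1 := by push_cast; ring
      rw [hcast, PySem.List.pyRange_one_succ_right (by omega : (1 : Int) ≤ (k : Int) + 1),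
        List.foldl_append, ihk]
      simp only [List.foldl_cons, List.foldl_nil]
      exact glj_step l h2 k hk1 hk

-- list.index of a present element is its first index
lemma index?_eq_some_idxOf (l : List Char) (v : Char) (h : v ∈ l) :
    PySem.List.index? l v = some (List.idxOf v l) := by
  rw [PySem.List.index?_eq_some_iff]
  have hlt : List.idxOf v l < l.length := List.idxOf_lt_length_of_mem h
  refine ⟨l.take (List.idxOf v l), l.drop (List.idxOf v l + 1), ?_, ?_, ?_⟩
  · conv_lhs => rw [← List.take_append_drop (List.idxOf v l) l]
    rw [List.drop_eq_getElem_cons hlt, List.getElem_idxOf hlt]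
  · simp
    omega
  · intro hmem
    exact absurd (idxOf_lt_of_mem_take l v _ hmem) (lt_irrefl _)

-- ===== VERDICT (by name: the statement is the Claim_ definition above) =====
theorem get_largest_joltage_spec : Claim_equal_get_largest_joltage := by
  intro s _ hpre
  obtain ⟨h2, -⟩ := hpre
  unfold Spec_get_largest_joltage get_largest_joltage get_largest_joltage_alt
  set l := s.toList with hl
  have hlen : PySem.Str.len s = (l.length : Int) := PySem.Str.len_eq s
  have hg0 : PySem.List.pyGetD l (0 : Int) '?' = l.getD 0 '?' := by
    rw [show (0 : Int) = ((0 : Nat) : Int) by norm_num, PySem.List.pyGetD_natCast]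
  have hg1 : PySem.List.pyGetD l (1 : Int) '?' = l.getD 1 '?' := by
    rw [show (1 : Int) = ((1 : Nat) : Int) by norm_num, PySem.List.pyGetD_natCast]
  have hK : ((l.length : Int)) = ((l.length - 1 : Nat) : Int) + 1 := by omega
  have hloop := glj_loop l h2 (l.length - 1) (by omega) (by omega)
  rw [← hK] at hloop
  have hm : min (l.length - 1) (l.length - 2) = l.length - 2 := by omega
  have hamem : segMax l 0 (l.length - 2) ∈ l.take (l.length - 1) := by
    have h := segMax_mem l 0 (l.length - 2) (Nat.zero_le _) (by omega)
    have he : l.length - 2 + 1 - 0 = l.length - 1 := by omega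
    rw [he] at h
    simpa using h
  have hj : List.idxOf (segMax l 0 (l.length - 2)) l < l.length - 1 :=
    idxOf_lt_of_mem_take l _ _ hamem
  have hmax : max (l.length - 1) (List.idxOf (segMax l 0 (l.length - 2)) l + 1) = l.length - 1 := by
    omega
  have habs : abSpec l (l.length - 1) =
      (segMax l 0 (l.length - 2),
       segMax l (List.idxOf (segMax l 0 (l.length - 2)) l + 1) (l.length - 1)) := by
    simp only [abSpec, hm, hmax]
  have hfirst : PySem.List.max? (l.take (l.length - 1)) (fun c => c) =
      some (segMax l 0 (l.length - 2)) := by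
    have h := max?_eq_segMax l 0 (l.length - 2) (Nat.zero_le _) (by omega)
    have he : l.length - 2 + 1 - 0 = l.length - 1 := by omega
    rw [he] at h
    simpa using h
  have hsecond : PySem.List.max? (l.drop (List.idxOf (segMax l 0 (l.length - 2)) l + 1))
      (fun c => c) =
      some (segMax l (List.idxOf (segMax l 0 (l.length - 2)) l + 1) (l.length - 1)) := by
    have h := max?_eq_segMax l (List.idxOf (segMax l 0 (l.length - 2)) l + 1) (l.length - 1)
      (by omega) (by omega)
    have hdt : (l.drop (List.idxOf (segMax l 0 (l.length - 2)) l + 1)).take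
        (l.length - 1 + 1 - (List.idxOf (segMax l 0 (l.length - 2)) l + 1)) =
        l.drop (List.idxOf (segMax l 0 (l.length - 2)) l + 1) := by
      apply List.take_of_length_le
      simp
      omega
    rwa [hdt] at h
  have hslice : PySem.List.slice l
      (some ((List.idxOf (segMax l 0 (l.length - 2)) l : Int) + 1)) none =
      l.drop (List.idxOf (segMax l 0 (l.length - 2)) l + 1) := by
    rw [show ((List.idxOf (segMax l 0 (l.length - 2)) l : Int) + 1) =
        ((List.idxOf (segMax l 0 (l.length - 2)) l + 1 : Nat) : Int) by push_cast; ring,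
      PySem.List.slice_from_natCast]
  simp only [hlen, hg0, hg1, hloop, habs, PySem.List.slice_to_neg_one,
    List.dropLast_eq_take, hfirst,
    index?_eq_some_idxOf l (segMax l 0 (l.length - 2)) (List.mem_of_mem_take hamem),
    hslice, hsecond]
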